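-- pv_equiv track=rewrite | github.com/RamoonRoomeu/AutomaticAssessmentSax | PerformanceAssessment_App/pysimmusic-extended_rhythm_error_visualization/simmusic/feature_extraction.py | convert_letters_2_num_list
-- ===== SOURCE A (Python) =====
-- def convert_letters_2_num_list(syllables_letters_aligned):
--     """
--     Helper function to convert letters to a numeric list
--     :param syllables_letters_aligned:
--     :return:
--     """
--     counter = 0
--     number_syl = [None] * len(syllables_letters_aligned)
--     for ii, s in enumerate(syllables_letters_aligned):
--         if s != "-":
--             number_syl[ii] = counter
--             counter += 1
--     return number_syl
-- ===== SOURCE B (Python) =====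
-- def convert_letters_2_num_list(syllables_letters_aligned):
--     """
--     Helper function to convert letters to a numeric list
--     :param syllables_letters_aligned:
--     :return:
--     """
--     # pass 1: cumulative count of non-dash syllables up to each position
--     counts = []
--     total = 0
--     for s in syllables_letters_aligned:
--         total += (s != "-")
--         counts.append(total)
--     # pass 2: map each position to its 0-based id (counts[i]-1) or None
--     return [c - 1 if s != "-" else None
--             for s, c in zip(syllables_letters_aligned, counts)]
-- ===== Notes on version B (the rewrite author's own statement) =====
-- stated objective: alternative
-- what changed: Replaces the single running-counter loop that writes into a preallocated None list by index with two separate passes: first a cumulative-count table of non-dash syllables, then a zip/comprehension mapping each element to counts[i]-1 or None.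
import Mathlib
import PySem

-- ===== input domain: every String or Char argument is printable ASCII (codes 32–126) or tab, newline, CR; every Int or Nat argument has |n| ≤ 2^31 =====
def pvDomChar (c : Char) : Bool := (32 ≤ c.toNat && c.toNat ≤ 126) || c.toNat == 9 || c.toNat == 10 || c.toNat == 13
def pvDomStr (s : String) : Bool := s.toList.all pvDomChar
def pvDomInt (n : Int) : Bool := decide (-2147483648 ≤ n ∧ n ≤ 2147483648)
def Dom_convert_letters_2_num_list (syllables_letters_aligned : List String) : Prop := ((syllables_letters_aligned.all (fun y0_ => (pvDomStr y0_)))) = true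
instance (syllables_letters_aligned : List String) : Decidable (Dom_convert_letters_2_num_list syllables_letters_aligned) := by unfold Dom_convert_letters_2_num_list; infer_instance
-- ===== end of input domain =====

-- B replaces A's running-counter loop writing into a preallocated list by a
-- prefix-count table pass followed by a zip/map pass (objective: alternative).

-- ===== PORT A =====
-- counter = 0; number_syl = [None]*len; for ii,s in enumerate: if s != "-": number_syl[ii] = counter; counter += 1
def convert_letters_2_num_list (syllables_letters_aligned : List String) : List (Option Int) :=
  let number_syl : List (Option Int) := List.replicate syllables_letters_aligned.length none
  let final := (PySem.List.enumerate syllables_letters_aligned).foldl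
    (fun (st : Int × List (Option Int)) p =>
      if p.2 ≠ "-" then (st.1 + 1, PySem.List.pySetD st.2 p.1 (some st.1)) else st)
    (0, number_syl)
  final.2

-- ===== PORT B =====
-- pass 1: counts = cumulative number of non-dash syllables; pass 2: zip + map
def convert_letters_2_num_list_alt (syllables_letters_aligned : List String) : List (Option Int) :=
  let counts := (syllables_letters_aligned.foldl
    (fun (st : Int × List Int) s =>
      let total := st.1 + (if s ≠ "-" then 1 else 0)
      (total, st.2 ++ [total])) (0, [])).2
  (syllables_letters_aligned.zip counts).map
    (fun p => if p.1 ≠ "-" then some (p.2 - 1) else none)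

-- ===== PRECONDITION & SPEC =====
def Spec_convert_letters_2_num_list (syllables_letters_aligned : List String) (out : List (Option Int)) : Prop := out = convert_letters_2_num_list_alt syllables_letters_aligned
instance (syllables_letters_aligned : List String) (out : List (Option Int)) : Decidable (Spec_convert_letters_2_num_list syllables_letters_aligned out) := by unfold Spec_convert_letters_2_num_list; infer_instance

-- ===== CLAIM (what is proved, stated in full; the proofs are below) =====
def Claim_equal_convert_letters_2_num_list : Prop := ∀ (syllables_letters_aligned : List String), Dom_convert_letters_2_num_list syllables_letters_aligned → Spec_convert_letters_2_num_list syllables_letters_aligned (convert_letters_2_num_list syllables_letters_aligned)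

-- ===== LEMMAS AND PROOFS =====

-- reference: the intended result for suffix xs with next id c
def pvRef : List String → Int → List (Option Int)
  | [], _ => []
  | s :: t, c => if s ≠ "-" then some c :: pvRef t (c + 1) else none :: pvRef t c

-- A-side invariant
theorem pvA_inv (xs : List String) : ∀ (pre : List (Option Int)) (c : Int),
    ((PySem.List.enumerate xs (pre.length : Int)).foldl
      (fun (st : Int × List (Option Int)) p =>
        if p.2 ≠ "-" then (st.1 + 1, PySem.List.pySetD st.2 p.1 (some st.1)) else st)
      (c, pre ++ List.replicate xs.length none)).2 = pre ++ pvRef xs c := by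
  induction xs with
  | nil => intro pre c; simp [pvRef, PySem.List.enumerate_nil]
  | cons s t ih =>
    intro pre c
    rw [PySem.List.enumerate_cons]
    simp only [List.foldl_cons]
    by_cases hs : s = "-"
    · subst hs
      have h1 : pre ++ List.replicate (List.length ("-" :: t)) (none : Option Int)
          = (pre ++ [none]) ++ List.replicate t.length none := by
        simp [List.replicate_succ]
      have h2 : ((pre.length : Int) + 1) = (((pre ++ [(none : Option Int)]).length : Int)) := by
        simp
      simp only [ne_eq, not_true_eq_false, if_false, h1, h2, ih]
      simp [pvRef]
    · have hset : PySem.List.pySetD (pre ++ List.replicate (List.length (s :: t)) (none : Option Int))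
          ((pre.length : Int)) (some c)
          = (pre ++ [some c]) ++ List.replicate t.length none := by
        rw [PySem.List.pySetD_of_nonneg (h := Int.natCast_nonneg _)]
        simp [List.replicate_succ, List.set_append_right, List.append_assoc]
      have h2 : ((pre.length : Int) + 1) = (((pre ++ [some c]).length : Int)) := by simp
      simp only [ne_eq, hs, not_false_eq_true, if_true, hset, h2, ih]
      simp [pvRef, hs]

-- B-side: the counts fold with accumulator
def pvCounts : List String → Int → List Int
  | [], _ => []
  | s :: t, c =>
      let c' := c + (if s ≠ "-" then 1 else 0)
      c' :: pvCounts t c'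

theorem pvB_counts (xs : List String) : ∀ (acc : List Int) (c : Int),
    (xs.foldl (fun (st : Int × List Int) s =>
        let total := st.1 + (if s ≠ "-" then 1 else 0)
        (total, st.2 ++ [total])) (c, acc)).2 = acc ++ pvCounts xs c := by
  induction xs with
  | nil => intro acc c; simp [pvCounts]
  | cons s t ih =>
    intro acc c
    simp only [List.foldl_cons, pvCounts, ih]
    simp

theorem pvB_map (xs : List String) : ∀ (c : Int),
    (xs.zip (pvCounts xs c)).map
      (fun p => if p.1 ≠ "-" then some (p.2 - 1) else none) = pvRef xs c := by
  induction xs with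
  | nil => intro c; simp [pvCounts, pvRef]
  | cons s t ih =>
    intro c
    simp only [pvCounts, pvRef, List.zip_cons_cons, List.map_cons, ih]
    by_cases hs : s = "-" <;> simp [hs]

-- ===== VERDICT (by name: the statement is the Claim_ definition above) =====
theorem convert_letters_2_num_list_spec : Claim_equal_convert_letters_2_num_list := by
  intro xs _
  unfold Spec_convert_letters_2_num_list convert_letters_2_num_list convert_letters_2_num_list_alt
  have hA := pvA_inv xs [] 0
  simp only [List.length_nil, List.nil_append, Int.natCast_zero] at hA
  have hB := pvB_counts xs [] 0
  simp only [List.nil_append] at hB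
  simp only [hA, hB, pvB_map]
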